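-- pv_equiv track=rewrite | github.com/seieric/chess-search | python/modules/board.py | _create_op_maps
-- ===== SOURCE A (Python) =====
-- def _create_op_maps(size: tuple[int, int]) -> list[dict[int, int]]:
--     """対称変換用のマッピングを作成する
--
--     Args:
--         size (tuple[int, int]): ボードのサイズ（縦, 横）
--
--     Returns:
--         list[dict[int, int]]: 各対称変換に対応するインデックスマッピングのリスト
--     """
--     ops = [
--         (lambda r, c: r, lambda r, c: c),  # Identity
--         (lambda r, c: r, lambda r, c: size[1] - 1 - c),  # Horizontal Mirror
--         (lambda r, c: size[0] - 1 - r, lambda r, c: c),  # Vertical Mirror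
--         (lambda r, c: size[0] - 1 - r, lambda r, c: size[1] - 1 - c),  # 180 Rotate
--     ]
--
--     # 正方形の場合は対角系も追加
--     if size[0] == size[1]:
--         ops.extend(
--             [
--                 (lambda r, c: c, lambda r, c: r),  # Transpose (Diagonal)
--                 (
--                     lambda r, c: size[1] - 1 - c,
--                     lambda r, c: size[0] - 1 - r,
--                 ),  # Anti-transpose
--                 (lambda r, c: c, lambda r, c: size[0] - 1 - r),  # 90 Rotate
--                 (lambda r, c: size[1] - 1 - c, lambda r, c: r),  # 270 Rotate
--             ]
--         )
--
--     op_maps: list[dict[int, int]] = []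
--     for r_op, c_op in ops:
--         op_map: dict[int, int] = {}
--         for r in range(size[0]):
--             for c in range(size[1]):
--                 new_r, new_c = r_op(r, c), c_op(r, c)
--                 op_map[r * size[1] + c] = new_r * size[1] + new_c
--         op_maps.append(op_map)
--
--     return op_maps
-- ===== SOURCE B (Python) =====
-- def _create_op_maps(size):
--     """Build four base index-permutation dicts by looping over cells once each,
--     then derive 180/anti-transpose/90/270 by composing permutations via lookups."""
--     R, C = size
--     cells = [(r, c) for r in range(R) for c in range(C)]
--
--     def perm(f):
--         m = {}
--         for r, c in cells:
--             nr, nc = f(r, c)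
--             m[r * C + c] = nr * C + nc
--         return m
--
--     def compose(m1, m2):
--         # every value of m1 is a key of m2 (both are permutations of the same cells)
--         m = {}
--         for i, j in m1.items():
--             m[i] = m2[j]
--         return m
--
--     ident = perm(lambda r, c: (r, c))
--     hmir = perm(lambda r, c: (r, C - 1 - c))
--     vmir = perm(lambda r, c: (R - 1 - r, c))
--     rot180 = compose(hmir, vmir)
--     maps = [ident, hmir, vmir, rot180]
--     if R == C:
--         trans = perm(lambda r, c: (c, r))
--         maps += [trans, compose(trans, rot180), compose(trans, hmir), compose(trans, vmir)]
--     return maps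
-- ===== Notes on version B (the rewrite author's own statement) =====
-- stated objective: alternative
-- what changed: Instead of recomputing coordinate formulas for all eight symmetry maps in one nested loop over an ops table of lambda pairs, B builds only the base permutation dicts (identity, horizontal mirror, vertical mirror, and transpose for square boards) by looping over cells, and derives 180, anti-transpose, 90 and 270 by composing permutations via dict lookups.
import Mathlib
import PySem

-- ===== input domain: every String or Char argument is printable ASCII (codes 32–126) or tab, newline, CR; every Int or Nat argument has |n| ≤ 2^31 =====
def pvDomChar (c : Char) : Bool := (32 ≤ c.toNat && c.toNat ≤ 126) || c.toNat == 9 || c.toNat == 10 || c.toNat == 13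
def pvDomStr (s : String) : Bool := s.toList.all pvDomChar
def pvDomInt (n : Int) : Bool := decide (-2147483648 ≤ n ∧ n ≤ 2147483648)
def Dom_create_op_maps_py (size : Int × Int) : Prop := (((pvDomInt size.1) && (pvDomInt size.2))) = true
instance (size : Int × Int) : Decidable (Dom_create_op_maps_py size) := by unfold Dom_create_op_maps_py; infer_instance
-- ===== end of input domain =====

-- B replaces A's eight-coordinate-formula nested loops by four base permutation dicts
-- plus permutation composition via dict lookups (alternative decomposition, same cost).


-- ===== PORT A =====
def create_op_maps_py (size : Int × Int) : List (List (Int × Int)) :=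
  let ops : List ((Int → Int → Int) × (Int → Int → Int)) :=
    [ (fun r _ => r, fun _ c => c),                                       -- Identity
      (fun r _ => r, fun _ c => size.2 - 1 - c),                          -- Horizontal Mirror
      (fun r _ => size.1 - 1 - r, fun _ c => c),                          -- Vertical Mirror
      (fun r _ => size.1 - 1 - r, fun _ c => size.2 - 1 - c) ]            -- 180 Rotate
    ++ (if size.1 = size.2 then
    [ (fun _ c => c, fun r _ => r),                                       -- Transpose
      (fun _ c => size.2 - 1 - c, fun r _ => size.1 - 1 - r),             -- Anti-transpose
      (fun _ c => c, fun r _ => size.1 - 1 - r),                          -- 90 Rotate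
      (fun _ c => size.2 - 1 - c, fun r _ => r) ] else [])                -- 270 Rotate
  ops.foldl (fun op_maps op =>
    op_maps ++ [((PySem.List.pyRange 0 size.1 1).foldl (fun op_map r =>
        (PySem.List.pyRange 0 size.2 1).foldl (fun op_map c =>
          op_map.insert (r * size.2 + c) (op.1 r c * size.2 + op.2 r c)) op_map)
      (PySem.Dict.empty : PySem.Dict Int Int)).items]) []

-- ===== PORT B =====
-- cells = [(r, c) for r in range(R) for c in range(C)]
def pvCells (R C : Int) : List (Int × Int) :=
  (PySem.List.pyRange 0 R 1).flatMap fun r => (PySem.List.pyRange 0 C 1).map fun c => (r, c)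

-- perm(f): one pass over cells, m[r*C+c] = nr*C+nc
def pvPerm (R C : Int) (f : Int → Int → Int × Int) : PySem.Dict Int Int :=
  (pvCells R C).foldl
    (fun m p => m.insert (p.1 * C + p.2) ((f p.1 p.2).1 * C + (f p.1 p.2).2)) PySem.Dict.empty

-- compose(m1, m2): m[i] = m2[m1[i]]; the indexing m2[j] is exact here because every
-- value of m1 is a key of m2 (both are permutations of the same cell indices)
def pvCompose (m1 m2 : PySem.Dict Int Int) : PySem.Dict Int Int :=
  m1.items.foldl (fun m p => m.insert p.1 (m2.getD p.2 0)) PySem.Dict.empty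

def create_op_maps_py_alt (size : Int × Int) : List (List (Int × Int)) :=
  let R := size.1
  let C := size.2
  let ident := pvPerm R C (fun r c => (r, c))
  let hmir := pvPerm R C (fun r c => (r, C - 1 - c))
  let vmir := pvPerm R C (fun r c => (R - 1 - r, c))
  let rot180 := pvCompose hmir vmir
  let maps := [ident, hmir, vmir, rot180]
  let maps := if R = C then
      let trans := pvPerm R C (fun r c => (c, r))
      maps ++ [trans, pvCompose trans rot180, pvCompose trans hmir, pvCompose trans vmir]
    else maps
  maps.map (fun m => m.items)

-- ===== PRECONDITION & SPEC =====
def Spec_create_op_maps_py (size : Int × Int) (out : List (List (Int × Int))) : Prop := out = create_op_maps_py_alt size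
instance (size : Int × Int) (out : List (List (Int × Int))) : Decidable (Spec_create_op_maps_py size out) := by unfold Spec_create_op_maps_py; infer_instance

-- ===== CLAIM (what is proved, stated in full; the proofs are below) =====
def Claim_equal_create_op_maps_py : Prop := ∀ (size : Int × Int), Dom_create_op_maps_py size → Spec_create_op_maps_py size (create_op_maps_py size)

-- ===== LEMMAS AND PROOFS =====

def pvTable (R C : Int) (w : Int × Int → Int) : List (Int × Int) :=
  (pvCells R C).map (fun p => (p.1 * C + p.2, w p))

theorem pvCells_mem {R C : Int} {p : Int × Int} :
    p ∈ pvCells R C ↔ (0 ≤ p.1 ∧ p.1 < R) ∧ (0 ≤ p.2 ∧ p.2 < C) := by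
  obtain ⟨a, b⟩ := p
  simp only [pvCells, List.mem_flatMap, List.mem_map, PySem.List.mem_pyRange_one,
    Prod.mk.injEq]
  constructor
  · rintro ⟨r, hr, c, hc, rfl, rfl⟩; exact ⟨hr, hc⟩
  · rintro ⟨ha, hb⟩; exact ⟨a, ha, b, hb, rfl, rfl⟩

theorem pvCells_nodup (R C : Int) : (pvCells R C).Nodup := by
  have : pvCells R C = (PySem.List.pyRange 0 R 1) ×ˢ (PySem.List.pyRange 0 C 1) := rfl
  rw [this]
  exact List.Nodup.product (PySem.List.nodup_pyRange_one 0 R) (PySem.List.nodup_pyRange_one 0 C)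

theorem pvKey_inj {R C : Int} {p q : Int × Int} (hp : p ∈ pvCells R C) (hq : q ∈ pvCells R C)
    (h : p.1 * C + p.2 = q.1 * C + q.2) : p = q := by
  rw [pvCells_mem] at hp hq
  have h1 : p.1 = q.1 := by
    rcases lt_trichotomy p.1 q.1 with hlt | heq | hgt
    · exfalso
      have : (p.1 + 1) * C ≤ q.1 * C := by
        apply mul_le_mul_of_nonneg_right (by omega) (by omega)
      nlinarith [hp.2.1, hp.2.2, hq.2.1, hq.2.2]
    · exact heq
    · exfalso
      have : (q.1 + 1) * C ≤ p.1 * C := by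
        apply mul_le_mul_of_nonneg_right (by omega) (by omega)
      nlinarith [hp.2.1, hp.2.2, hq.2.1, hq.2.2]
  have h2 : p.2 = q.2 := by rw [h1] at h; omega
  exact Prod.ext h1 h2

theorem pvKeys_nodup (R C : Int) : ((pvCells R C).map (fun p => p.1 * C + p.2)).Nodup :=
  List.Nodup.map_on (fun _ hx _ hy h => pvKey_inj hx hy h) (pvCells_nodup R C)

theorem pvFold_items (R C : Int) (g : Int × Int → Int) :
    ((pvCells R C).foldl (fun m p => m.insert (p.1 * C + p.2) (g p)) PySem.Dict.empty).items
      = pvTable R C g := by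
  have h := PySem.Dict.items_foldl_insert_fresh (l := pvCells R C)
    (k := fun p => p.1 * C + p.2) (v := g) (d := PySem.Dict.empty)
    (fun a _ => by simp [PySem.Dict.contains_empty]) (pvKeys_nodup R C)
  simpa [pvTable, PySem.Dict.empty] using h

theorem pvPerm_items (R C : Int) (f : Int → Int → Int × Int) :
    (pvPerm R C f).items = pvTable R C (fun p => (f p.1 p.2).1 * C + (f p.1 p.2).2) :=
  pvFold_items R C _

theorem pvA_items (R C : Int) (g : Int → Int → Int) :
    ((PySem.List.pyRange 0 R 1).foldl (fun d r =>
        (PySem.List.pyRange 0 C 1).foldl (fun d c =>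
          d.insert (r * C + c) (g r c)) d) (PySem.Dict.empty : PySem.Dict Int Int)).items
      = pvTable R C (fun p => g p.1 p.2) := by
  rw [← pvFold_items R C (fun p => g p.1 p.2)]
  simp only [pvCells, List.foldl_flatMap, List.foldl_map]

theorem pvTable_getD {R C : Int} {w : Int × Int → Int} {d : PySem.Dict Int Int}
    (hd : d.items = pvTable R C w) {a b : Int}
    (ha : 0 ≤ a ∧ a < R) (hb : 0 ≤ b ∧ b < C) :
    d.getD (a * C + b) 0 = w (a, b) := by
  have hk : d.keys.Nodup := by
    have : d.keys = (pvCells R C).map (fun p => p.1 * C + p.2) := by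
      simp only [PySem.Dict.keys, hd, pvTable, List.map_map]; rfl
    rw [this]; exact pvKeys_nodup R C
  have hmem : ((a * C + b, w (a, b)) : Int × Int) ∈ d.items := by
    rw [hd, pvTable]
    exact List.mem_map.mpr ⟨(a, b), pvCells_mem.mpr ⟨ha, hb⟩, rfl⟩
  exact PySem.Dict.getD_of_mem_items d hmem hk 0

theorem pvCompose_items {R C : Int} {w1 : Int × Int → Int} (m1 m2 : PySem.Dict Int Int)
    (h1 : m1.items = pvTable R C w1) :
    (pvCompose m1 m2).items = pvTable R C (fun p => m2.getD (w1 p) 0) := by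
  have hk : (m1.items.map (fun p : Int × Int => p.1)).Nodup := by
    rw [h1]; simp only [pvTable, List.map_map]
    exact pvKeys_nodup R C
  have h := PySem.Dict.items_foldl_insert_fresh (l := m1.items)
    (k := fun p : Int × Int => p.1) (v := fun p : Int × Int => m2.getD p.2 0)
    (d := PySem.Dict.empty)
    (fun a _ => by simp [PySem.Dict.contains_empty]) hk
  simp only [pvCompose]
  simpa [h1, pvTable, List.map_map, PySem.Dict.empty] using h

theorem pvTable_congr {R C : Int} {w w' : Int × Int → Int}
    (h : ∀ p ∈ pvCells R C, w p = w' p) : pvTable R C w = pvTable R C w' := by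
  unfold pvTable
  exact List.map_congr_left (fun p hp => by rw [h p hp])

-- ===== VERDICT (by name: the statement is the Claim_ definition above) =====
theorem create_op_maps_py_spec : Claim_equal_create_op_maps_py := by
  intro size _
  obtain ⟨R, C⟩ := size
  show create_op_maps_py (R, C) = create_op_maps_py_alt (R, C)
  simp only [create_op_maps_py, create_op_maps_py_alt]
  by_cases h : R = C
  · subst h
    rw [if_pos rfl, if_pos rfl]
    simp only [List.cons_append, List.nil_append, List.foldl_cons, List.foldl_nil,
      List.map_cons, List.map_nil]
    have hh := pvPerm_items R R (fun r c => (r, R - 1 - c))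
    have hv := pvPerm_items R R (fun r c => (R - 1 - r, c))
    have ht := pvPerm_items R R (fun r c => (c, r))
    have h180 : (pvCompose (pvPerm R R fun r c => (r, R - 1 - c))
        (pvPerm R R fun r c => (R - 1 - r, c))).items
        = pvTable R R (fun p => (R - 1 - p.1) * R + (R - 1 - p.2)) := by
      rw [pvCompose_items (w1 := fun p => p.1 * R + (R - 1 - p.2)) _ _ hh]
      apply pvTable_congr
      intro p hp
      rw [pvCells_mem] at hp
      obtain ⟨h1, h2⟩ := hp
      rw [pvTable_getD hv h1 ⟨by omega, by omega⟩]
    simp only [List.cons.injEq, and_true]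
    refine ⟨?_, ?_, ?_, ?_, ?_, ?_, ?_, ?_⟩
    · rw [pvA_items R R _, pvPerm_items R R _]
    · rw [pvA_items R R _, hh]
    · rw [pvA_items R R _, hv]
    · rw [pvA_items R R _, h180]
    · rw [pvA_items R R _, ht]
    · -- Anti-transpose = compose trans rot180
      rw [pvA_items R R _, pvCompose_items (w1 := fun p => p.2 * R + p.1) _ _ ht]
      apply pvTable_congr
      intro p hp
      rw [pvCells_mem] at hp
      obtain ⟨h1, h2⟩ := hp
      rw [pvTable_getD h180 h2 h1]
    · -- 90 Rotate = compose trans hmir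
      rw [pvA_items R R _, pvCompose_items (w1 := fun p => p.2 * R + p.1) _ _ ht]
      apply pvTable_congr
      intro p hp
      rw [pvCells_mem] at hp
      obtain ⟨h1, h2⟩ := hp
      rw [pvTable_getD hh h2 h1]
    · -- 270 Rotate = compose trans vmir
      rw [pvA_items R R _, pvCompose_items (w1 := fun p => p.2 * R + p.1) _ _ ht]
      apply pvTable_congr
      intro p hp
      rw [pvCells_mem] at hp
      obtain ⟨h1, h2⟩ := hp
      rw [pvTable_getD hv h2 h1]
  · rw [if_neg h, if_neg h]
    simp only [List.cons_append, List.nil_append, List.append_nil, List.foldl_cons,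
      List.foldl_nil, List.map_cons, List.map_nil]
    have hh := pvPerm_items R C (fun r c => (r, C - 1 - c))
    have hv := pvPerm_items R C (fun r c => (R - 1 - r, c))
    simp only [List.cons.injEq, and_true]
    refine ⟨?_, ?_, ?_, ?_⟩
    · rw [pvA_items R C _, pvPerm_items R C _]
    · rw [pvA_items R C _, hh]
    · rw [pvA_items R C _, hv]
    · rw [pvA_items R C _, pvCompose_items (w1 := fun p => p.1 * C + (C - 1 - p.2)) _ _ hh]
      apply pvTable_congr
      intro p hp
      rw [pvCells_mem] at hp
      obtain ⟨h1, h2⟩ := hp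
      rw [pvTable_getD hv h1 ⟨by omega, by omega⟩]
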